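-- pv_equiv track=rewrite | github.com/n0tanna/milesianpy | src/milesianpy/parsers/variable_parser.py | has_equals_sign
-- ===== SOURCE A (Python) =====
-- def has_equals_sign(user_input: list):
--     has_equals = False
--     right_side = []
--     left_side = []
--     for x in user_input:
--         if x == '=':
--             has_equals = True
--
--         else:
--             if has_equals is True:
--                 right_side.append(x)
--
--             else:
--                 left_side.append(x)
--
--     return [left_side, right_side]
-- ===== SOURCE B (Python) =====
-- def has_equals_sign(user_input: list):
--     if '=' in user_input:
--         idx = user_input.index('=')
--         left = list(user_input[:idx])
--         right = [x for x in user_input[idx + 1:] if x != '=']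
--         return [left, right]
--     return [list(user_input), []]
-- ===== Notes on version B (the rewrite author's own statement) =====
-- stated objective: idiomatic
-- what changed: Replaces the flag-driven single accumulating loop with a split at the first '=' found via index(): a slice for the left side and a filtering comprehension for the right side.
import Mathlib
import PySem

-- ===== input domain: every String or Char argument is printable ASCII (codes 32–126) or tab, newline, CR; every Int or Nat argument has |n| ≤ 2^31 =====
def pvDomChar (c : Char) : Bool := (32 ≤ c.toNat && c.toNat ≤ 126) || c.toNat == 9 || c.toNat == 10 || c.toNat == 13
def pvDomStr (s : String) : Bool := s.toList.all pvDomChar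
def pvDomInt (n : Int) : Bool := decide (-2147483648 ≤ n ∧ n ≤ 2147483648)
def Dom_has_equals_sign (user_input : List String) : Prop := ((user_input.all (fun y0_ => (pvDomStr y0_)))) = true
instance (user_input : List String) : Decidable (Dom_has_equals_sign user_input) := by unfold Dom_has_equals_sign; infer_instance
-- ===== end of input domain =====

-- B splits at the first '=' (index + slices + filter) instead of A's flag-driven accumulating loop; objective: idiomatic.

-- ===== PORT A =====
-- state: (has_equals, right_side, left_side), appended exactly as A does
def has_equals_sign (user_input : List String) : List (List String) :=
  let st := user_input.foldl
    (fun (st : Bool × List String × List String) x =>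
      if x = "=" then (true, st.2.1, st.2.2)
      else if st.1 = true then (st.1, st.2.1 ++ [x], st.2.2)
      else (st.1, st.2.1, st.2.2 ++ [x]))
    (false, [], [])
  [st.2.2, st.2.1]

-- ===== PORT B =====
def has_equals_sign_alt (user_input : List String) : List (List String) :=
  if "=" ∈ user_input then
    let idx := user_input.idxOf "="
    [user_input.take idx, (user_input.drop (idx + 1)).filter (fun x => x ≠ "=")]
  else [user_input, []]

-- ===== PRECONDITION & SPEC =====
def Spec_has_equals_sign (user_input : List String) (out : List (List String)) : Prop := out = has_equals_sign_alt user_input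
instance (user_input : List String) (out : List (List String)) : Decidable (Spec_has_equals_sign user_input out) := by unfold Spec_has_equals_sign; infer_instance

-- ===== CLAIM (what is proved, stated in full; the proofs are below) =====
def Claim_equal_has_equals_sign : Prop := ∀ (user_input : List String), Dom_has_equals_sign user_input → Spec_has_equals_sign user_input (has_equals_sign user_input)

-- ===== LEMMAS AND PROOFS =====

def pvStepA (st : Bool × List String × List String) (x : String) : Bool × List String × List String :=
  if x = "=" then (true, st.2.1, st.2.2)
  else if st.1 = true then (st.1, st.2.1 ++ [x], st.2.2)
  else (st.1, st.2.1, st.2.2 ++ [x])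

theorem foldl_pvStepA_true (l : List String) (r lf : List String) :
    l.foldl pvStepA (true, r, lf) = (true, r ++ l.filter (fun x => x ≠ "="), lf) := by
  induction l generalizing r with
  | nil => simp
  | cons a t ih =>
    by_cases h : a = "="
    · simp [pvStepA, h, ih]
    · simp [pvStepA, h, ih]

theorem foldl_pvStepA_false (l : List String) (r lf : List String) :
    l.foldl pvStepA (false, r, lf) =
      if "=" ∈ l then
        (true, r ++ (l.drop (l.idxOf "=" + 1)).filter (fun x => x ≠ "="), lf ++ l.take (l.idxOf "="))
      else (false, r, lf ++ l) := by
  induction l generalizing lf with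
  | nil => simp
  | cons a t ih =>
    by_cases h : a = "="
    · subst h
      simp [pvStepA, foldl_pvStepA_true]
    · have hne : ¬ ("=" = a) := fun hh => h hh.symm
      simp [pvStepA, h, ih, hne]

theorem has_equals_sign_eq (user_input : List String) :
    has_equals_sign user_input = has_equals_sign_alt user_input := by
  unfold has_equals_sign has_equals_sign_alt
  have : (fun (st : Bool × List String × List String) x =>
      if x = "=" then (true, st.2.1, st.2.2)
      else if st.1 = true then (st.1, st.2.1 ++ [x], st.2.2)
      else (st.1, st.2.1, st.2.2 ++ [x])) = pvStepA := rfl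
  rw [this, foldl_pvStepA_false]
  split_ifs <;> simp

-- ===== VERDICT (by name: the statement is the Claim_ definition above) =====
theorem has_equals_sign_spec : Claim_equal_has_equals_sign := by
  intro ui _
  unfold Spec_has_equals_sign
  exact has_equals_sign_eq ui
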